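-- pv_equiv track=rewrite | github.com/klukas17/stopro-seminar | markov_chain_music_composition.py | zeroOrderComposition
-- ===== SOURCE A (Python) =====
-- def zeroOrderComposition(events):
--
--     plays = []
--
--     for i in range(len(events)):
--
--         e = events[i][1]
--
--         if e[0][0] == 'on':
--
--             notes = [x[1] for x in e]
--             noteVelocity = {}
--             for x in e:
--                 noteVelocity[x[1]] = x[2]
--
--             unmatched = set(notes.copy())
--             matched = set()
--             duration = 0
--
--             for j in range(i+1, len(events)):
--                 duration += events[j][0]
--                 if events[j][1][0][0] == 'off':
--                     offNotes = [x[1] for x in events[j][1]]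
--                     if len(set(offNotes).intersection(set(unmatched))) > 0:
--                         newlyFound = []
--                         for el in offNotes:
--                             if el in unmatched:
--                                 matched.add(el)
--                                 unmatched.remove(el)
--                                 newlyFound.append((el, noteVelocity[el]))
--                         if len(newlyFound) > 0:
--                             newlyFound.sort()
--                             plays.append((duration, newlyFound))
--                 if len(unmatched) == 0:
--                     break
--
--     hashableList = []
--     for p in plays:
--         l = []
--         l.append(p[0])
--         for i in p[1]:
--             l.append(i[0])
--             l.append(i[1])
--         hashableList.append(tuple(l))
--
--     occurences = {}
--     for el in hashableList:
--         if el not in occurences: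
--             occurences[el] = 1
--         else:
--             occurences[el] = occurences[el] + 1
--
--     t = 0
--     transitionDict = {}
--     for el in occurences:
--         t += occurences[el]
--         transitionDict[t] = el
--
--     currTime = 0
--     waitDict = {}
--     for i in range(len(events)):
--         currEvent = events[i]
--         currTime += currEvent[0]
--         if currEvent[1][0][0] == 'on' and currTime != 0:
--             if currTime not in waitDict:
--                 waitDict[currTime] = 1
--             else:
--                 waitDict[currTime] = waitDict[currTime] + 1
--             currTime = 0
--
--     t = 0
--     timeDict = {}
--     for el in waitDict:
--         t += waitDict[el]
--         timeDict[t] = el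
--
--     return transitionDict, timeDict
-- ===== SOURCE B (Python) =====
-- def zeroOrderComposition(events):
--     # One forward pass: every open chord (from an 'on' event) is carried along and
--     # fed each later event once, instead of a fresh O(n) rescan per 'on' event;
--     # both result dicts are then assembled directly as zip(cumulative counts, keys).
--     open_groups = []   # [seq, bucket, unmatched_notes, velocity, duration]
--     closed = []        # finished (seq, bucket) pairs
--     seq = 0
--     for delta, e in events:
--         tag = e[0][0]
--         if tag == 'off':
--             off = {x[1] for x in e}
--             survivors = []
--             for g in open_groups:
--                 g[4] += delta
--                 hit = g[2] & off
--                 if hit: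
--                     g[2] -= hit
--                     g[1].append((g[4], sorted((n, g[3][n]) for n in hit)))
--                 if g[2]:
--                     survivors.append(g)
--                 else:
--                     closed.append((g[0], g[1]))
--             open_groups = survivors
--         else:
--             for g in open_groups:
--                 g[4] += delta
--             if tag == 'on':
--                 open_groups.append([seq, [], {x[1] for x in e}, {x[1]: x[2] for x in e}, 0])
--                 seq += 1
--     pairs = closed + [(g[0], g[1]) for g in open_groups]
--     pairs.sort(key=lambda kb: kb[0])
--     plays = [p for _, b in pairs for p in b]
--
--     hashable = [(p[0],) + tuple(v for nv in p[1] for v in nv) for p in plays]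
--     order = list(dict.fromkeys(hashable))
--     counts = [hashable.count(k) for k in order]
--     cums = []
--     t = 0
--     for c in counts:
--         t += c
--         cums.append(t)
--     transitionDict = dict(zip(cums, order))   # cums strictly increase: no key collision
--
--     ons = []
--     total = 0
--     for delta, e in events:
--         total += delta
--         if e[0][0] == 'on':
--             ons.append(total)
--     waits = [y - x for x, y in zip([0] + ons, ons) if y != x]
--     worder = list(dict.fromkeys(waits))
--     wcounts = [waits.count(w) for w in worder]
--     wcums = []
--     t = 0
--     for c in wcounts:
--         t += c
--         wcums.append(t)
--     timeDict = dict(zip(wcums, worder))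
--
--     return transitionDict, timeDict
-- ===== Notes on version B (the rewrite author's own statement) =====
-- stated objective: alternative
-- what changed: Instead of A's per-'on'-event forward rescan over the rest of the event list, B makes one forward pass that carries all open chords along, distributing each event to them once, then sorts the per-chord buckets by chord index; the two result dicts are assembled by deduplicating keys in first-occurrence order, counting, and zipping cumulative counts with the keys, instead of A's incremental counting dict re-walked into a second dict; waits come from prefix sums of on-event times.
import Mathlib
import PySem

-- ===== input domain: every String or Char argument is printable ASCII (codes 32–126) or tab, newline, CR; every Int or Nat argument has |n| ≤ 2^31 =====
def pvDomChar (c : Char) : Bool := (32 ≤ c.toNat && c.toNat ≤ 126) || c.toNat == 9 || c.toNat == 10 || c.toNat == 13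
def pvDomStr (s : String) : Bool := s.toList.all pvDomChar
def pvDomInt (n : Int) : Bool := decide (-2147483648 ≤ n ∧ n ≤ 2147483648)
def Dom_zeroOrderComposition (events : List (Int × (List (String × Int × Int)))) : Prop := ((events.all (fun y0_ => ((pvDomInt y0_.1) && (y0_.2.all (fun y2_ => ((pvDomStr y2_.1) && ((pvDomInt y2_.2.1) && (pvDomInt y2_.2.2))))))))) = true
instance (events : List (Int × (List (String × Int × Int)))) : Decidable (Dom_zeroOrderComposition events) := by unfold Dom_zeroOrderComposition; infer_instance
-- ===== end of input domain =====

-- B replaces A's quadratic per-chord forward rescans by ONE forward pass that carries all open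
-- chords along, and assembles both result dicts by dedup/count/zip-of-cumulative-sums instead of
-- A's incremental counting dict re-walked into a second dict (objective: alternative algorithm).

-- ===== PORT A =====
-- inner 'for el in offNotes' loop body of A
def zocAFold (noteVelocity : PySem.Dict Int Int)
    (st : PySem.Set Int × PySem.Set Int × List (Int × Int)) (el : Int) :
    PySem.Set Int × PySem.Set Int × List (Int × Int) :=
  if PySem.Set.contains st.1 el then
    -- unmatched.remove(el) is guarded by 'el in unmatched', so it equals discard here
    (PySem.Set.discard st.1 el, PySem.Set.add st.2.1 el, st.2.2 ++ [(el, noteVelocity.getD el 0)])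
  else st

-- A's 'for j in range(i+1, len(events))' scan with its break; plays is the accumulator
def zocAInner (noteVelocity : PySem.Dict Int Int) :
    List (Int × List (String × Int × Int)) → PySem.Set Int → PySem.Set Int → Int →
    List (Int × List (Int × Int)) → List (Int × List (Int × Int))
  | [], _, _, _, plays => plays
  | (d, ev) :: rest, unmatched, matched, duration, plays =>
    let duration := duration + d
    let st :=
      if (ev.headD ("", 0, 0)).1 == "off" then
        let offNotes := ev.map (fun x => x.2.1)
        if 0 < (PySem.Set.inter (PySem.Set.ofList offNotes) (PySem.Set.ofList unmatched)).length then
          let st2 := offNotes.foldl (zocAFold noteVelocity) (unmatched, matched, [])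
          if 0 < st2.2.2.length then
            -- newlyFound.sort() on int pairs = sorted2 by (fst, snd)
            (st2.1, st2.2.1, plays ++ [(duration, PySem.List.sorted2 st2.2.2 Prod.fst Prod.snd)])
          else (st2.1, st2.2.1, plays)
        else (unmatched, matched, plays)
      else (unmatched, matched, plays)
    if st.1.length == 0 then st.2.2
    else zocAInner noteVelocity rest st.1 st.2.1 duration st.2.2

-- A's outer 'for i in range(len(events))' loop
def zocAOuter : List (Int × List (String × Int × Int)) → List (Int × List (Int × Int)) →
    List (Int × List (Int × Int))
  | [], plays => plays
  | (_, e) :: rest, plays =>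
    let plays :=
      if (e.headD ("", 0, 0)).1 == "on" then
        let notes := e.map (fun x => x.2.1)
        let noteVelocity := e.foldl (fun nv (x : String × Int × Int) => nv.insert x.2.1 x.2.2)
          PySem.Dict.empty
        -- noteVelocity[el] is always present (el ∈ unmatched ⊆ notes), so getD is exact
        zocAInner noteVelocity rest (PySem.Set.ofList notes) PySem.Set.empty 0 plays
      else plays
    zocAOuter rest plays

def zeroOrderComposition (events : List (Int × (List (String × Int × Int)))) :
    (List (Int × List Int)) × (List (Int × Int)) :=
  let plays := zocAOuter events []
  let hashableList := plays.foldl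
    (fun acc p => acc ++ [p.2.foldl (fun l (i : Int × Int) => l ++ [i.1, i.2]) [p.1]]) []
  let occurences : PySem.Dict (List Int) Int := hashableList.foldl
    (fun occ el => if occ.contains el then occ.insert el (occ.getD el 0 + 1) else occ.insert el 1)
    PySem.Dict.empty
  let transitionDict := (occurences.items.foldl
    (fun (s : Int × PySem.Dict Int (List Int)) kv => (s.1 + kv.2, s.2.insert (s.1 + kv.2) kv.1))
    (0, PySem.Dict.empty)).2
  let waitDict := (events.foldl (fun (s : Int × PySem.Dict Int Int) ev =>
      let c := s.1 + ev.1
      if (ev.2.headD ("", 0, 0)).1 == "on" && !(c == 0) then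
        (0, if s.2.contains c then s.2.insert c (s.2.getD c 0 + 1) else s.2.insert c 1)
      else (c, s.2)) (0, PySem.Dict.empty)).2
  let timeDict := (waitDict.items.foldl
    (fun (s : Int × PySem.Dict Int Int) kv => (s.1 + kv.2, s.2.insert (s.1 + kv.2) kv.1))
    (0, PySem.Dict.empty)).2
  (transitionDict.items, timeDict.items)

-- ===== PORT B =====
-- an open chord: B's [seq, bucket, unmatched, velocity, duration]
structure ZGroup where
  seq : Int
  bucket : List (Int × List (Int × Int))
  unmatched : PySem.Set Int
  vel : PySem.Dict Int Int
  dur : Int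

-- B's loop body over one event
def zocBStep (st : List ZGroup × List (Int × List (Int × List (Int × Int))) × Int)
    (ev : Int × List (String × Int × Int)) :
    List ZGroup × List (Int × List (Int × List (Int × Int))) × Int :=
  let tag := (ev.2.headD ("", 0, 0)).1
  if tag == "off" then
    let off := PySem.Set.ofList (ev.2.map (fun x => x.2.1))
    let r := st.1.foldl (fun acc g =>
        let g1 : ZGroup := { g with dur := g.dur + ev.1 }
        let hit := PySem.Set.inter g1.unmatched off
        let g2 : ZGroup :=
          if 0 < hit.length then
            { g1 with
              unmatched := PySem.Set.diff g1.unmatched hit,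
              bucket := g1.bucket ++
                [(g1.dur, PySem.List.sorted2 (hit.map (fun n => (n, g1.vel.getD n 0)))
                    Prod.fst Prod.snd)] }
          else g1
        if 0 < g2.unmatched.length then (acc.1 ++ [g2], acc.2)
        else (acc.1, acc.2 ++ [(g2.seq, g2.bucket)]))
      ([], st.2.1)
    (r.1, r.2, st.2.2)
  else
    let opn := st.1.map (fun g => { g with dur := g.dur + ev.1 })
    if tag == "on" then
      (opn ++ [{ seq := st.2.2, bucket := [],
                 unmatched := PySem.Set.ofList (ev.2.map (fun x => x.2.1)),
                 vel := ev.2.foldl (fun nv x => nv.insert x.2.1 x.2.2) PySem.Dict.empty,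
                 dur := 0 }],
       st.2.1, st.2.2 + 1)
    else (opn, st.2.1, st.2.2)

-- B's cumulative-sum list ('t += c; cums.append(t)')
def zScanSum : Int → List Int → List Int
  | _, [] => []
  | t, c :: cs => (t + c) :: zScanSum (t + c) cs

def zeroOrderComposition_alt (events : List (Int × (List (String × Int × Int)))) :
    (List (Int × List Int)) × (List (Int × Int)) :=
  let fin := events.foldl zocBStep ([], [], 0)
  let pairs := fin.2.1 ++ fin.1.map (fun g => (g.seq, g.bucket))
  let pairsS := PySem.List.sorted pairs (fun p => p.1)
  let plays := pairsS.flatMap (fun p => p.2)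
  let hashable := plays.map (fun p => p.1 :: p.2.flatMap (fun nv => [nv.1, nv.2]))
  let order := PySem.List.dedup hashable
  let counts := order.map (fun k => (hashable.count k : Int))
  -- dict(zip(cums, order)): the cumulative keys strictly increase, so this IS the items list
  let transitionDict := (zScanSum 0 counts).zip order
  let ons := (events.foldl (fun (s : List Int × Int) ev =>
      let t := s.2 + ev.1
      ((if (ev.2.headD ("", 0, 0)).1 == "on" then s.1 ++ [t] else s.1), t)) ([], 0)).1
  let waits := (((0 :: ons).zip ons).filter (fun p => !(p.2 == p.1))).map (fun p => p.2 - p.1)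
  let worder := PySem.List.dedup waits
  let wcounts := worder.map (fun w => (waits.count w : Int))
  let timeDict := (zScanSum 0 wcounts).zip worder
  (transitionDict, timeDict)

-- ===== PRECONDITION & SPEC =====
-- Pre_ excludes events whose note list is empty: A's 'e[0][0]' raises IndexError there.
def Pre_zeroOrderComposition (events : List (Int × (List (String × Int × Int)))) : Prop :=
  ∀ p ∈ events, p.2 ≠ []
instance (events : List (Int × (List (String × Int × Int)))) :
    Decidable (Pre_zeroOrderComposition events) := by
  unfold Pre_zeroOrderComposition; infer_instance

def pvWitness_zeroOrderComposition : (List (Int × (List (String × Int × Int)))) :=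
  [(0, [("on", 60, 100)]), (2, [("off", 60, 0)])]

def Spec_zeroOrderComposition (events : List (Int × (List (String × Int × Int))))
    (out : (List (Int × List Int)) × (List (Int × Int))) : Prop :=
  out = zeroOrderComposition_alt events
instance (events : List (Int × (List (String × Int × Int))))
    (out : (List (Int × List Int)) × (List (Int × Int))) :
    Decidable (Spec_zeroOrderComposition events out) := by
  unfold Spec_zeroOrderComposition; infer_instance

-- ===== CLAIM (what is proved, stated in full; the proofs are below) =====
def Claim_equal_zeroOrderComposition : Prop :=
  ∀ (events : List (Int × (List (String × Int × Int)))), Dom_zeroOrderComposition events →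
    Pre_zeroOrderComposition events →
    Spec_zeroOrderComposition events (zeroOrderComposition events)

-- ===== LEMMAS AND PROOFS =====

-- shared vocabulary of the proofs (not used by the ports)
def zIsOff (e : List (String × Int × Int)) : Bool := (e.headD ("", 0, 0)).1 == "off"
def zIsOn (e : List (String × Int × Int)) : Bool := (e.headD ("", 0, 0)).1 == "on"
def zNotes (e : List (String × Int × Int)) : List Int := e.map (fun x => x.2.1)
def zVel (e : List (String × Int × Int)) : PySem.Dict Int Int :=
  e.foldl (fun nv x => nv.insert x.2.1 x.2.2) PySem.Dict.empty
def zKey (p : Int × List (Int × Int)) : List Int := p.1 :: p.2.flatMap (fun nv => [nv.1, nv.2])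

-- the per-chord forward scan both programs compute (B's formulation)
def zScan (vel : PySem.Dict Int Int) :
    PySem.Set Int → Int → List (Int × List (String × Int × Int)) → List (Int × List (Int × Int))
  | _, _, [] => []
  | u, dur, (d, e) :: rest =>
    if zIsOff e then
      let hit := PySem.Set.inter u (PySem.Set.ofList (zNotes e))
      if 0 < hit.length then
        let here := (dur + d, PySem.List.sorted2 (hit.map (fun n => (n, vel.getD n 0))) Prod.fst Prod.snd)
        let u' := PySem.Set.diff u hit
        if 0 < u'.length then here :: zScan vel u' (dur + d) rest else [here]
      else zScan vel u (dur + d) rest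
    else zScan vel u (dur + d) rest

-- reference result: one (seq, chord plays) pair per 'on' event, in order
def zSpec : List (Int × List (String × Int × Int)) → Int → List (Int × List (Int × List (Int × Int)))
  | [], _ => []
  | (_, e) :: rest, seq =>
    if zIsOn e then (seq, zScan (zVel e) (PySem.Set.ofList (zNotes e)) 0 rest) :: zSpec rest (seq + 1)
    else zSpec rest seq

-- the notes A's offNotes loop collects, in its order
def zCollect : List Int → PySem.Set Int → List Int
  | [], _ => []
  | o :: os, u => if PySem.Set.contains u o then o :: zCollect os (PySem.Set.discard u o) else zCollect os u

theorem zocAFold_fst (vel : PySem.Dict Int Int) (os : List Int) :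
    ∀ (u m : PySem.Set Int) (nf : List (Int × Int)),
    (os.foldl (zocAFold vel) (u, m, nf)).1 = u.filter (fun x => !os.contains x) := by
  induction os with
  | nil => intro u m nf; simp
  | cons o os ih =>
    intro u m nf
    simp only [List.foldl_cons, zocAFold]
    by_cases h : PySem.Set.contains u o = true
    · rw [if_pos h, ih]
      rw [show PySem.Set.discard u o = u.filter (fun y => !(y == o)) from rfl, List.filter_filter]
      refine List.filter_congr ?_
      intro x _
      by_cases hxo : x = o
      · simp [hxo]
      · simp [List.contains_cons, beq_false_of_ne hxo, hxo]
    · rw [if_neg h, ih]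
      refine List.filter_congr ?_
      intro x hx
      have hxo : x ≠ o := by
        intro he; subst he
        exact h (List.contains_iff_mem.mpr hx)
      simp only [List.contains_cons, beq_false_of_ne hxo, Bool.false_or]

theorem zocAFold_nf (vel : PySem.Dict Int Int) (os : List Int) :
    ∀ (u m : PySem.Set Int) (nf : List (Int × Int)),
    (os.foldl (zocAFold vel) (u, m, nf)).2.2 = nf ++ (zCollect os u).map (fun n => (n, vel.getD n 0)) := by
  induction os with
  | nil => intro u m nf; simp [zCollect]
  | cons o os ih =>
    intro u m nf
    simp only [List.foldl_cons, zocAFold, zCollect]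
    by_cases h : PySem.Set.contains u o = true
    · rw [if_pos h, if_pos h, ih]
      simp
    · rw [if_neg h, if_neg h, ih]

theorem mem_zCollect (os : List Int) : ∀ (u : PySem.Set Int) (x : Int),
    x ∈ zCollect os u ↔ x ∈ os ∧ x ∈ u := by
  induction os with
  | nil => intro u x; simp [zCollect]
  | cons o os ih =>
    intro u x
    simp only [zCollect]
    have hd : ∀ y : Int, y ∈ PySem.Set.discard u o ↔ y ∈ u ∧ y ≠ o := by
      intro y
      show y ∈ u.filter (fun z => !(z == o)) ↔ _
      simp [List.mem_filter]
    by_cases h : PySem.Set.contains u o = true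
    · have ho : o ∈ u := List.contains_iff_mem.mp h
      rw [if_pos h]
      simp only [List.mem_cons, ih]
      constructor
      · rintro (rfl | ⟨h1, h2⟩)
        · exact ⟨Or.inl rfl, ho⟩
        · exact ⟨Or.inr h1, ((hd x).mp h2).1⟩
      · rintro ⟨h1, h2⟩
        rcases h1 with rfl | h1
        · exact Or.inl rfl
        · by_cases hxo : x = o
          · exact Or.inl hxo
          · exact Or.inr ⟨h1, (hd x).mpr ⟨h2, hxo⟩⟩
    · have ho : o ∉ u := fun hm => h (List.contains_iff_mem.mpr hm)
      rw [if_neg h, ih]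
      simp only [List.mem_cons]
      constructor
      · rintro ⟨h1, h2⟩; exact ⟨Or.inr h1, h2⟩
      · rintro ⟨h1, h2⟩
        rcases h1 with rfl | h1
        · exact absurd h2 ho
        · exact ⟨h1, h2⟩

theorem nodup_zCollect (os : List Int) : ∀ (u : PySem.Set Int), u.Nodup → (zCollect os u).Nodup := by
  induction os with
  | nil => intro u _; simp [zCollect]
  | cons o os ih =>
    intro u hu
    simp only [zCollect]
    by_cases h : PySem.Set.contains u o = true
    · rw [if_pos h]
      refine List.nodup_cons.mpr ⟨?_, ih _ (List.Nodup.filter _ hu)⟩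
      intro hmem
      have := (mem_zCollect os (PySem.Set.discard u o) o).mp hmem
      have h2 : o ∈ u.filter (fun z => !(z == o)) := this.2
      simp [List.mem_filter] at h2
    · rw [if_neg h]; exact ih u hu

-- sorted2 on int pairs with distinct first components is determined by the multiset
theorem zoc_insertBy_congr {α : Type} (b1 b2 : α → α → Bool) (x : α) (ys : List α)
    (h : ∀ y ∈ ys, b1 x y = b2 x y) :
    PySem.List.insertBy b1 x ys = PySem.List.insertBy b2 x ys := by
  induction ys with
  | nil => rfl
  | cons y ys ih =>
    simp only [PySem.List.insertBy]
    rw [h y List.mem_cons_self]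
    by_cases hb : b2 x y = true
    · rw [if_pos hb, if_pos hb]
    · rw [if_neg hb, if_neg hb, ih (fun z hz => h z (List.mem_cons_of_mem _ hz))]

theorem zoc_foldl_insertBy_congr {α : Type} (b1 b2 : α → α → Bool) :
    ∀ (xs acc : List α),
    (∀ x y : α, (x ∈ xs ∨ x ∈ acc) → (y ∈ xs ∨ y ∈ acc) → b1 x y = b2 x y) →
    xs.foldl (fun a x => PySem.List.insertBy b1 x a) acc
      = xs.foldl (fun a x => PySem.List.insertBy b2 x a) acc := by
  intro xs
  induction xs with
  | nil => intro acc _; rfl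
  | cons x xs ih =>
    intro acc h
    simp only [List.foldl_cons]
    rw [zoc_insertBy_congr b1 b2 x acc
      (fun y hy => h x y (Or.inl List.mem_cons_self) (Or.inr hy))]
    refine ih _ ?_
    intro a b ha hb
    have hmem : ∀ c : α, (c ∈ xs ∨ c ∈ PySem.List.insertBy b2 x acc) → (c ∈ x :: xs ∨ c ∈ acc) := by
      intro c hc
      rcases hc with hc | hc
      · exact Or.inl (List.mem_cons_of_mem _ hc)
      · rcases (PySem.List.mem_insertBy b2 x c acc).mp hc with rfl | hc
        · exact Or.inl List.mem_cons_self
        · exact Or.inr hc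
    exact h a b (hmem a ha) (hmem b hb)

theorem zoc_sorted2_eq_sorted_fst (xs : List (Int × Int)) (h : (xs.map Prod.fst).Nodup) :
    PySem.List.sorted2 xs Prod.fst Prod.snd = PySem.List.sorted xs (fun p => p.1) := by
  have hinj := List.inj_on_of_nodup_map h
  rw [PySem.List.sorted_eq_foldl_insertBy]
  show xs.foldl (fun acc x => PySem.List.insertBy
      (fun a b => decide (a.1 < b.1) || (!decide (b.1 < a.1) && decide (a.2 < b.2))) x acc) [] = _
  refine zoc_foldl_insertBy_congr _ _ xs [] ?_
  intro x y hx hy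
  simp only [List.mem_nil_iff, or_false] at hx hy
  by_cases hxy : x.1 = y.1
  · have : x = y := hinj hx hy hxy
    subst this
    simp
  · rcases lt_trichotomy x.1 y.1 with hlt | heq | hgt
    · simp [hlt, le_of_lt hlt]
    · exact absurd heq hxy
    · simp [hgt, not_lt.mpr (le_of_lt hgt), not_lt.mpr (le_of_lt hgt)]

theorem zoc_sorted2_congr (xs ys : List (Int × Int)) (hperm : xs.Perm ys)
    (h : (ys.map Prod.fst).Nodup) :
    PySem.List.sorted2 xs Prod.fst Prod.snd = PySem.List.sorted2 ys Prod.fst Prod.snd := by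
  have hx : (xs.map Prod.fst).Nodup := by
    refine (List.Perm.nodup_iff (List.Perm.map Prod.fst hperm)).mpr h
  rw [zoc_sorted2_eq_sorted_fst xs hx, zoc_sorted2_eq_sorted_fst ys h]
  have hpnd : (PySem.List.sorted ys (fun p => p.1)).Perm ys := PySem.List.sorted_perm ys _ false
  have hnd : ((PySem.List.sorted ys (fun p => p.1)).map Prod.fst).Nodup :=
    (List.Perm.nodup_iff (List.Perm.map Prod.fst hpnd)).mpr h
  have hle : (PySem.List.sorted ys (fun p => p.1)).Pairwise (fun a b => a.1 ≤ b.1) :=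
    PySem.List.sorted_pairwise ys _
  have hne : (PySem.List.sorted ys (fun p => p.1)).Pairwise (fun a b => a.1 ≠ b.1) :=
    (List.pairwise_map.mp hnd)
  have hlt : (PySem.List.sorted ys (fun p => p.1)).Pairwise (fun a b => a.1 < b.1) := by
    have := List.Pairwise.and hle hne
    exact this.imp (fun h => lt_of_le_of_ne h.1 h.2)
  refine PySem.List.sorted_eq_of_perm_of_pairwise_lt xs _ _ ?_ hlt
  exact hpnd.trans (hperm.symm)

theorem mem_inter (a b : List Int) (x : Int) :
    x ∈ PySem.Set.inter a b ↔ x ∈ a ∧ x ∈ b := by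
  show x ∈ a.filter (fun y => b.contains y) ↔ _
  simp [List.mem_filter, List.contains_iff_mem]

theorem zocAInner_eq (vel : PySem.Dict Int Int) :
    ∀ (rest : List (Int × List (String × Int × Int))) (u m : PySem.Set Int) (dur : Int)
      (plays : List (Int × List (Int × Int))), u ≠ [] → u.Nodup →
    zocAInner vel rest u m dur plays = plays ++ zScan vel u dur rest := by
  intro rest
  induction rest with
  | nil => intro u m dur plays _ _; simp [zocAInner, zScan]
  | cons ev rest ih =>
    rcases ev with ⟨d, e⟩
    intro u m dur plays hne hnd
    have hbreak : (u.length == 0) = false :=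
      beq_false_of_ne (by simpa [List.length_eq_zero_iff] using hne)
    simp only [zocAInner, zScan]
    by_cases hoff : ((e.headD ("", 0, 0)).1 == "off") = true
    · rw [if_pos hoff, if_pos (show zIsOff e = true from hoff)]
      have hGiff : (0 < (PySem.Set.inter (PySem.Set.ofList (e.map (fun x => x.2.1)))
            (PySem.Set.ofList u)).length)
          ↔ (0 < (PySem.Set.inter u (PySem.Set.ofList (zNotes e))).length) := by
        rw [List.length_pos_iff_exists_mem, List.length_pos_iff_exists_mem]
        constructor
        · rintro ⟨x, hx⟩
          rw [mem_inter] at hx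
          exact ⟨x, (mem_inter _ _ x).mpr
            ⟨(PySem.Set.mem_ofList u x).mp hx.2, by
              show x ∈ PySem.Set.ofList (e.map (fun y => y.2.1)); exact hx.1⟩⟩
        · rintro ⟨x, hx⟩
          rw [mem_inter] at hx
          exact ⟨x, (mem_inter _ _ x).mpr
            ⟨hx.2, (PySem.Set.mem_ofList u x).mpr hx.1⟩⟩
      by_cases hG : 0 < (PySem.Set.inter (PySem.Set.ofList (e.map (fun x => x.2.1)))
          (PySem.Set.ofList u)).length
      · rw [if_pos hG]
        have h1 := zocAFold_fst vel (e.map (fun x => x.2.1)) u m []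
        have h2 := zocAFold_nf vel (e.map (fun x => x.2.1)) u m []
        have hhit : 0 < (PySem.Set.inter u (PySem.Set.ofList (zNotes e))).length := hGiff.mp hG
        have hcol : zCollect (e.map (fun x => x.2.1)) u ≠ [] := by
          obtain ⟨x, hx⟩ := List.length_pos_iff_exists_mem.mp hhit
          rw [mem_inter] at hx
          have hxo : x ∈ e.map (fun y => y.2.1) :=
            (PySem.Set.mem_ofList _ x).mp hx.2
          exact List.ne_nil_of_mem ((mem_zCollect _ u x).mpr ⟨hxo, hx.1⟩)
        have hnfpos : 0 < (List.foldl (zocAFold vel) (u, m, []) (e.map (fun x => x.2.1))).2.2.length := by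
          rw [h2]
          simpa [List.length_pos_iff] using hcol
        rw [if_pos hnfpos]
        have hndInter : (PySem.Set.inter u (PySem.Set.ofList (zNotes e))).Nodup :=
          List.Nodup.filter _ hnd
        have hpermC : (zCollect (e.map (fun x => x.2.1)) u).Perm
            (PySem.Set.inter u (PySem.Set.ofList (zNotes e))) := by
          refine (List.perm_ext_iff_of_nodup (nodup_zCollect _ u hnd) hndInter).mpr ?_
          intro a
          rw [mem_zCollect, mem_inter]
          constructor
          · rintro ⟨h1', h2'⟩
            exact ⟨h2', (PySem.Set.mem_ofList _ a).mpr h1'⟩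
          · rintro ⟨h1', h2'⟩
            exact ⟨(PySem.Set.mem_ofList _ a).mp h2', h1'⟩
        have hsort : PySem.List.sorted2
            ((zCollect (e.map (fun x => x.2.1)) u).map (fun n => (n, vel.getD n 0)))
              Prod.fst Prod.snd
            = PySem.List.sorted2
              ((PySem.Set.inter u (PySem.Set.ofList (zNotes e))).map (fun n => (n, vel.getD n 0)))
              Prod.fst Prod.snd := by
          apply zoc_sorted2_congr
          · exact List.Perm.map _ hpermC
          · rw [List.map_map]
            have hcomp : (Prod.fst ∘ fun n : Int => (n, vel.getD n 0)) = fun n => n := rfl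
            rw [hcomp]
            simpa using hndInter
        have hdiff_def : PySem.Set.diff u (PySem.Set.inter u (PySem.Set.ofList (zNotes e)))
            = List.filter (fun x =>
                !(List.contains (PySem.Set.inter u (PySem.Set.ofList (zNotes e))) x)) u := rfl
        have huA : (List.foldl (zocAFold vel) (u, m, []) (e.map (fun x => x.2.1))).1
            = PySem.Set.diff u (PySem.Set.inter u (PySem.Set.ofList (zNotes e))) := by
          rw [h1, hdiff_def]
          refine List.filter_congr ?_
          intro x hxu
          have hcc : (List.contains (e.map (fun y => y.2.1)) x)
              = (List.contains (PySem.Set.inter u (PySem.Set.ofList (zNotes e))) x) := by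
            rw [Bool.eq_iff_iff, List.contains_iff_mem, List.contains_iff_mem]
            constructor
            · intro hx
              exact (mem_inter _ _ x).mpr ⟨hxu, (PySem.Set.mem_ofList _ x).mpr hx⟩
            · intro hx
              exact (PySem.Set.mem_ofList _ x).mp ((mem_inter _ _ x).mp hx).2
          rw [hcc]
        simp only [h2, List.nil_append, huA, hsort]
        have hulen := List.length_eq_zero_iff
          (l := PySem.Set.diff u (PySem.Set.inter u (PySem.Set.ofList (zNotes e))))
        by_cases hemp : (PySem.Set.diff u (PySem.Set.inter u (PySem.Set.ofList (zNotes e)))).length = 0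
        · have hb : ((PySem.Set.diff u (PySem.Set.inter u (PySem.Set.ofList (zNotes e)))).length == 0)
              = true := by simp [hemp]
          have hnot : ¬ 0 < (PySem.Set.diff u (PySem.Set.inter u (PySem.Set.ofList (zNotes e)))).length := by
            omega
          have hdiffnil : PySem.Set.diff u (PySem.Set.inter u (PySem.Set.ofList (zNotes e))) = [] :=
            hulen.mp hemp
          simp only [zNotes] at hdiffnil
          rw [if_pos hhit, if_neg hnot]
          simp [zNotes, hdiffnil]
        · have hb : ((PySem.Set.diff u (PySem.Set.inter u (PySem.Set.ofList (zNotes e)))).length == 0)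
              = false := beq_false_of_ne hemp
          have hpos : 0 < (PySem.Set.diff u (PySem.Set.inter u (PySem.Set.ofList (zNotes e)))).length := by
            omega
          rw [if_pos hhit, if_pos hpos]
          have hne' : PySem.Set.diff u (PySem.Set.inter u (PySem.Set.ofList (zNotes e))) ≠ [] :=
            fun hc => hemp (hulen.mpr hc)
          have hnd' : (PySem.Set.diff u (PySem.Set.inter u (PySem.Set.ofList (zNotes e)))).Nodup :=
            List.Nodup.filter _ hnd
          simp only [hb, Bool.false_eq_true, if_false]
          rw [ih _ _ (dur + d) _ hne' hnd']
          simp [zNotes]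
      · have hhitneg : ¬ 0 < (PySem.Set.inter u (PySem.Set.ofList (zNotes e))).length := by
          rw [← hGiff]; exact hG
        rw [if_neg hG, if_neg hhitneg]
        simp only [hbreak, Bool.false_eq_true, if_false]
        exact ih u m (dur + d) plays hne hnd
    · rw [if_neg hoff, if_neg (show ¬ zIsOff e = true from hoff)]
      simp only [hbreak, Bool.false_eq_true, if_false]
      exact ih u m (dur + d) plays hne hnd

theorem zocAOuter_eq :
    ∀ (evs : List (Int × List (String × Int × Int))) (plays : List (Int × List (Int × Int))) (seq : Int),
    (∀ p ∈ evs, p.2 ≠ []) →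
    zocAOuter evs plays = plays ++ (zSpec evs seq).flatMap (fun p => p.2) := by
  intro evs
  induction evs with
  | nil => intro plays seq _; simp [zocAOuter, zSpec]
  | cons ev rest ih =>
    rcases ev with ⟨dd, e⟩
    intro plays seq hpre
    have he : e ≠ [] := hpre (dd, e) List.mem_cons_self
    have hpre' : ∀ p ∈ rest, p.2 ≠ [] := fun p hp => hpre p (List.mem_cons_of_mem _ hp)
    simp only [zocAOuter, zSpec]
    by_cases hon : ((e.headD ("", 0, 0)).1 == "on") = true
    · rw [if_pos hon, if_pos (show zIsOn e = true from hon)]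
      have hu_ne : PySem.Set.ofList (e.map (fun x => x.2.1)) ≠ [] := by
        rcases List.exists_mem_of_ne_nil e he with ⟨y, hy⟩
        exact List.ne_nil_of_mem
          ((PySem.Set.mem_ofList _ (y.2.1)).mpr (List.mem_map_of_mem hy))
      rw [zocAInner_eq _ rest _ PySem.Set.empty 0 plays hu_ne (PySem.Set.nodup_ofList _)]
      rw [ih _ (seq + 1) hpre']
      simp [zVel, zNotes, List.append_assoc]
    · rw [if_neg hon, if_neg (show ¬ zIsOn e = true from hon)]
      exact ih plays seq hpre'

-- ===== B side =====

def zPairs (st : List ZGroup × List (Int × List (Int × List (Int × Int))) × Int) :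
    List (Int × List (Int × List (Int × Int))) :=
  st.2.1 ++ st.1.map (fun g => (g.seq, g.bucket))

def zTarget (evs : List (Int × List (String × Int × Int))) (g : ZGroup) :
    Int × List (Int × List (Int × Int)) :=
  (g.seq, g.bucket ++ zScan g.vel g.unmatched g.dur evs)

def zStepG (d : Int) (off : PySem.Set Int) (g : ZGroup) : ZGroup :=
  let g1 : ZGroup := { g with dur := g.dur + d }
  let hit := PySem.Set.inter g1.unmatched off
  if 0 < hit.length then
    { g1 with
      unmatched := PySem.Set.diff g1.unmatched hit,
      bucket := g1.bucket ++
        [(g1.dur, PySem.List.sorted2 (hit.map (fun n => (n, g1.vel.getD n 0))) Prod.fst Prod.snd)] }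
  else g1

theorem zocB_off_foldl (d : Int) (off : PySem.Set Int) :
    ∀ (gs : List ZGroup) (acc1 : List ZGroup) (acc2 : List (Int × List (Int × List (Int × Int)))),
    gs.foldl (fun acc g =>
        let g1 : ZGroup := { g with dur := g.dur + d }
        let hit := PySem.Set.inter g1.unmatched off
        let g2 : ZGroup :=
          if 0 < hit.length then
            { g1 with
              unmatched := PySem.Set.diff g1.unmatched hit,
              bucket := g1.bucket ++
                [(g1.dur, PySem.List.sorted2 (hit.map (fun n => (n, g1.vel.getD n 0)))
                    Prod.fst Prod.snd)] }
          else g1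
        if 0 < g2.unmatched.length then (acc.1 ++ [g2], acc.2)
        else (acc.1, acc.2 ++ [(g2.seq, g2.bucket)])) (acc1, acc2)
      = (acc1 ++ (gs.map (zStepG d off)).filter (fun g => decide (0 < g.unmatched.length)),
         acc2 ++ ((gs.map (zStepG d off)).filter (fun g => !decide (0 < g.unmatched.length))).map
           (fun g => (g.seq, g.bucket))) := by
  intro gs
  induction gs with
  | nil => intro acc1 acc2; simp
  | cons g gs ih =>
    intro acc1 acc2
    rw [List.foldl_cons]
    change List.foldl _
      (if 0 < (zStepG d off g).unmatched.length then (acc1 ++ [zStepG d off g], acc2)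
       else (acc1, acc2 ++ [((zStepG d off g).seq, (zStepG d off g).bucket)])) gs = _
    by_cases hk : 0 < (zStepG d off g).unmatched.length
    · rw [if_pos hk, ih]
      simp [List.map_cons, List.filter_cons, hk, List.append_assoc]
    · rw [if_neg hk, ih]
      simp [List.map_cons, List.filter_cons, hk, List.append_assoc]

theorem zStepG_target (d : Int) (e : List (String × Int × Int))
    (rest : List (Int × List (String × Int × Int))) (g : ZGroup)
    (hg : g.unmatched ≠ []) (hoff : zIsOff e = true) :
    (if 0 < (zStepG d (PySem.Set.ofList (zNotes e)) g).unmatched.length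
     then zTarget rest (zStepG d (PySem.Set.ofList (zNotes e)) g)
     else ((zStepG d (PySem.Set.ofList (zNotes e)) g).seq,
           (zStepG d (PySem.Set.ofList (zNotes e)) g).bucket))
    = zTarget ((d, e) :: rest) g := by
  simp only [zStepG, zTarget, zScan]
  rw [if_pos hoff]
  by_cases hhit : 0 < (PySem.Set.inter g.unmatched (PySem.Set.ofList (zNotes e))).length
  · rw [if_pos hhit, if_pos hhit]
    by_cases hu' : 0 < (PySem.Set.diff g.unmatched
        (PySem.Set.inter g.unmatched (PySem.Set.ofList (zNotes e)))).length
    · rw [if_pos hu', if_pos hu']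
      simp [List.append_assoc]
    · rw [if_neg hu', if_neg hu']
  · rw [if_neg hhit, if_neg hhit]
    have : 0 < g.unmatched.length := List.length_pos_iff.mpr hg
    rw [if_pos this]

theorem zocB_run_perm :
    ∀ (evs : List (Int × List (String × Int × Int))) (opn : List ZGroup)
      (closed : List (Int × List (Int × List (Int × Int)))) (seq : Int),
    (∀ p ∈ evs, p.2 ≠ []) → (∀ g ∈ opn, g.unmatched ≠ []) →
    (zPairs (evs.foldl zocBStep (opn, closed, seq))).Perm
      (closed ++ opn.map (zTarget evs) ++ zSpec evs seq) := by
  intro evs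
  induction evs with
  | nil =>
    intro opn closed seq _ _
    simp only [List.foldl_nil, zPairs, zSpec, List.append_nil]
    have hmap : opn.map (zTarget []) = opn.map (fun g => (g.seq, g.bucket)) := by
      refine List.map_congr_left ?_
      intro g _
      simp [zTarget, zScan]
    rw [hmap]
  | cons ev rest ih =>
    rcases ev with ⟨d, e⟩
    intro opn closed seq hpre hopn
    have hpre' : ∀ p ∈ rest, p.2 ≠ [] := fun p hp => hpre p (List.mem_cons_of_mem _ hp)
    have he : e ≠ [] := hpre (d, e) List.mem_cons_self
    simp only [List.foldl_cons]
    by_cases hoff : ((e.headD ("", 0, 0)).1 == "off") = true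
    · -- an 'off' event
      have hon : zIsOn e = false := by
        have h1 : (e.headD ("", 0, 0)).1 = "off" := by simpa using hoff
        simp only [zIsOn]
        rw [h1]
        decide
      have hstep : zocBStep (opn, closed, seq) (d, e) =
          ((opn.map (zStepG d (PySem.Set.ofList (e.map (fun x => x.2.1))))).filter
              (fun g => decide (0 < g.unmatched.length)),
           closed ++ ((opn.map (zStepG d (PySem.Set.ofList (e.map (fun x => x.2.1))))).filter
              (fun g => !decide (0 < g.unmatched.length))).map (fun g => (g.seq, g.bucket)),
           seq) := by
        show (if ((e.headD ("", 0, 0)).1 == "off") = true then _ else _) = _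
        rw [if_pos hoff, zocB_off_foldl d (PySem.Set.ofList (e.map (fun x => x.2.1))) opn [] closed]
        simp
      rw [hstep]
      have hsurv : ∀ g ∈ (opn.map (zStepG d (PySem.Set.ofList (e.map (fun x => x.2.1))))).filter
          (fun g => decide (0 < g.unmatched.length)), g.unmatched ≠ [] := by
        intro g hgmem
        have := (List.mem_filter.mp hgmem).2
        simp only [decide_eq_true_eq] at this
        exact List.length_pos_iff.mp this
      have ihres := ih ((opn.map (zStepG d (PySem.Set.ofList (e.map (fun x => x.2.1))))).filter
          (fun g => decide (0 < g.unmatched.length)))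
        (closed ++ ((opn.map (zStepG d (PySem.Set.ofList (e.map (fun x => x.2.1))))).filter
            (fun g => !decide (0 < g.unmatched.length))).map (fun g => (g.seq, g.bucket)))
        seq hpre' hsurv
      refine ihres.trans ?_
      have hfm1 : (opn.map (zStepG d (PySem.Set.ofList (e.map (fun x => x.2.1))))).filter
            (fun g => decide (0 < g.unmatched.length))
          = (opn.filter (fun g =>
              decide (0 < (zStepG d (PySem.Set.ofList (e.map (fun x => x.2.1))) g).unmatched.length))).map
            (zStepG d (PySem.Set.ofList (e.map (fun x => x.2.1)))) := by
        rw [List.filter_map]; rfl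
      have hfm2 : (opn.map (zStepG d (PySem.Set.ofList (e.map (fun x => x.2.1))))).filter
            (fun g => !decide (0 < g.unmatched.length))
          = (opn.filter (fun g =>
              !decide (0 < (zStepG d (PySem.Set.ofList (e.map (fun x => x.2.1))) g).unmatched.length))).map
            (zStepG d (PySem.Set.ofList (e.map (fun x => x.2.1)))) := by
        rw [List.filter_map]; rfl
      rw [hfm1, hfm2, List.map_map, List.map_map]
      have hTpos : ∀ g ∈ opn.filter (fun g =>
            decide (0 < (zStepG d (PySem.Set.ofList (e.map (fun x => x.2.1))) g).unmatched.length)),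
          (zTarget rest ∘ zStepG d (PySem.Set.ofList (e.map (fun x => x.2.1)))) g
            = zTarget ((d, e) :: rest) g := by
        intro g hgmem
        obtain ⟨hgo, hgp⟩ := List.mem_filter.mp hgmem
        simp only [decide_eq_true_eq] at hgp
        have := zStepG_target d e rest g (hopn g hgo) hoff
        rw [if_pos (by simpa [zNotes] using hgp)] at this
        simpa [zNotes] using this
      have hTneg : ∀ g ∈ opn.filter (fun g =>
            !decide (0 < (zStepG d (PySem.Set.ofList (e.map (fun x => x.2.1))) g).unmatched.length)),
          ((fun h : ZGroup => (h.seq, h.bucket)) ∘ zStepG d (PySem.Set.ofList (e.map (fun x => x.2.1)))) g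
            = zTarget ((d, e) :: rest) g := by
        intro g hgmem
        obtain ⟨hgo, hgp⟩ := List.mem_filter.mp hgmem
        simp only [Bool.not_eq_true', decide_eq_false_iff_not] at hgp
        have := zStepG_target d e rest g (hopn g hgo) hoff
        rw [if_neg (by simpa [zNotes] using hgp)] at this
        simpa [zNotes] using this
      rw [List.map_congr_left hTpos, List.map_congr_left hTneg]
      rw [show zSpec ((d, e) :: rest) seq = zSpec rest seq from by simp [zSpec, hon]]
      simp only [List.append_assoc]
      refine List.Perm.append_left closed ?_
      rw [← List.append_assoc]
      refine List.Perm.append_right (zSpec rest seq) ?_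
      refine (List.perm_append_comm).trans ?_
      rw [← List.map_append]
      exact (List.filter_append_perm _ opn).map _
    · -- not an 'off' event
      have hoffz : zIsOff e = false := Bool.eq_false_iff.mpr hoff
      by_cases hon : ((e.headD ("", 0, 0)).1 == "on") = true
      · have hstep : zocBStep (opn, closed, seq) (d, e) =
            (opn.map (fun g => { g with dur := g.dur + d }) ++
              [{ seq := seq, bucket := [],
                 unmatched := PySem.Set.ofList (e.map (fun x => x.2.1)),
                 vel := e.foldl (fun nv x => nv.insert x.2.1 x.2.2) PySem.Dict.empty,
                 dur := 0 }], closed, seq + 1) := by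
          show (if ((e.headD ("", 0, 0)).1 == "off") = true then _ else _) = _
          rw [if_neg hoff]
          show (if ((e.headD ("", 0, 0)).1 == "on") = true then _ else _) = _
          rw [if_pos hon]
        rw [hstep]
        have hopn' : ∀ g ∈ opn.map (fun g => { g with dur := g.dur + d }) ++
            [{ seq := seq, bucket := [],
               unmatched := PySem.Set.ofList (e.map (fun x => x.2.1)),
               vel := e.foldl (fun nv x => nv.insert x.2.1 x.2.2) PySem.Dict.empty,
               dur := 0 }], g.unmatched ≠ [] := by
          intro g hgmem
          rcases List.mem_append.mp hgmem with hgm | hgm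
          · obtain ⟨g0, hg0, rfl⟩ := List.mem_map.mp hgm
            exact hopn g0 hg0
          · rcases List.mem_singleton.mp hgm with rfl
            rcases List.exists_mem_of_ne_nil e he with ⟨y, hy⟩
            exact List.ne_nil_of_mem
              ((PySem.Set.mem_ofList _ (y.2.1)).mpr (List.mem_map_of_mem hy))
        have ihres := ih (opn.map (fun g => { g with dur := g.dur + d }) ++
            [{ seq := seq, bucket := [],
               unmatched := PySem.Set.ofList (e.map (fun x => x.2.1)),
               vel := e.foldl (fun nv x => nv.insert x.2.1 x.2.2) PySem.Dict.empty,
               dur := 0 }]) closed (seq + 1) hpre' hopn'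
        refine ihres.trans ?_
        rw [List.map_append, List.map_map]
        have hT : ∀ g ∈ opn, (zTarget rest ∘ fun g => { g with dur := g.dur + d }) g
            = zTarget ((d, e) :: rest) g := by
          intro g _
          simp only [Function.comp_apply, zTarget, zScan]
          rw [if_neg (by simp [hoffz])]
        rw [List.map_congr_left hT]
        rw [show zSpec ((d, e) :: rest) seq
            = (seq, zScan (zVel e) (PySem.Set.ofList (zNotes e)) 0 rest) :: zSpec rest (seq + 1)
          from by simp [zSpec, show zIsOn e = true from hon]]
        have hnew : zTarget rest
            (⟨seq, [], PySem.Set.ofList (e.map (fun x => x.2.1)),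
              e.foldl (fun nv x => nv.insert x.2.1 x.2.2) PySem.Dict.empty, 0⟩ : ZGroup)
            = (seq, zScan (zVel e) (PySem.Set.ofList (zNotes e)) 0 rest) := by
          simp [zTarget, zVel, zNotes]
        simp only [List.map_cons, List.map_nil]
        rw [hnew]
        simp [List.append_assoc]
      · have hstep : zocBStep (opn, closed, seq) (d, e) =
            (opn.map (fun g => { g with dur := g.dur + d }), closed, seq) := by
          show (if ((e.headD ("", 0, 0)).1 == "off") = true then _ else _) = _
          rw [if_neg hoff]
          show (if ((e.headD ("", 0, 0)).1 == "on") = true then _ else _) = _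
          rw [if_neg hon]
        rw [hstep]
        have hopn' : ∀ g ∈ opn.map (fun g => { g with dur := g.dur + d }), g.unmatched ≠ [] := by
          intro g hgmem
          obtain ⟨g0, hg0, rfl⟩ := List.mem_map.mp hgmem
          exact hopn g0 hg0
        have ihres := ih (opn.map (fun g => { g with dur := g.dur + d })) closed seq hpre' hopn'
        refine ihres.trans ?_
        rw [List.map_map]
        have hT : ∀ g ∈ opn, (zTarget rest ∘ fun g => { g with dur := g.dur + d }) g
            = zTarget ((d, e) :: rest) g := by
          intro g _
          simp only [Function.comp_apply, zTarget, zScan]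
          rw [if_neg (by simp [hoffz])]
        rw [List.map_congr_left hT]
        have honz : zIsOn e = false := Bool.eq_false_iff.mpr hon
        rw [show zSpec ((d, e) :: rest) seq = zSpec rest seq from by simp [zSpec, honz]]

theorem zSpec_bounds :
    ∀ (evs : List (Int × List (String × Int × Int))) (seq : Int),
    (zSpec evs seq).Pairwise (fun a b => a.1 < b.1) ∧ (∀ p ∈ zSpec evs seq, seq ≤ p.1) := by
  intro evs
  induction evs with
  | nil => intro seq; simp [zSpec]
  | cons ev rest ih =>
    rcases ev with ⟨d, e⟩
    intro seq
    simp only [zSpec]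
    by_cases h : zIsOn e = true
    · rw [if_pos h]
      obtain ⟨ihp, ihb⟩ := ih (seq + 1)
      refine ⟨List.pairwise_cons.mpr ⟨?_, ihp⟩, ?_⟩
      · intro p hp
        have := ihb p hp
        omega
      · intro p hp
        rcases List.mem_cons.mp hp with rfl | hp
        · exact le_refl _
        · have := ihb p hp; omega
    · rw [if_neg h]
      obtain ⟨ihp, ihb⟩ := ih seq
      exact ⟨ihp, ihb⟩

-- ===== second half (counting, cumulative dicts, waits) =====

theorem zoc_count_step {κ : Type} [BEq κ] [LawfulBEq κ] (occ : PySem.Dict κ Int) (el : κ) :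
    (if occ.contains el then occ.insert el (occ.getD el 0 + 1) else occ.insert el 1)
      = occ.insert el (occ.getD el 0 + 1) := by
  by_cases h : occ.contains el = true
  · rw [if_pos h]
  · rw [if_neg h, PySem.Dict.getD_of_not_contains occ 0 (Bool.not_eq_true _ ▸ eq_false_of_ne_true h)]
    norm_num

-- A's cumulative-dict loop over fresh, strictly increasing keys builds exactly zip(scan, keys)
theorem zoc_cumdict {κ : Type} [BEq κ] [LawfulBEq κ] :
    ∀ (l : List (κ × Int)) (t : Int) (d : PySem.Dict Int κ),
    (∀ kv ∈ l, 1 ≤ kv.2) → (∀ k ∈ d.keys, k ≤ t) →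
    ((l.foldl (fun (s : Int × PySem.Dict Int κ) kv => (s.1 + kv.2, s.2.insert (s.1 + kv.2) kv.1))
        (t, d)).2).items
      = d.items ++ (zScanSum t (l.map Prod.snd)).zip (l.map Prod.fst) := by
  intro l
  induction l with
  | nil => intro t d _ _; simp [zScanSum]
  | cons kv l ih =>
    rcases kv with ⟨k, c⟩
    intro t d hpos hkeys
    have hc : (1 : Int) ≤ c := hpos (k, c) List.mem_cons_self
    have hfresh : d.contains (t + c) = false := by
      rw [PySem.Dict.contains_eq_decide_mem_keys]
      simp only [decide_eq_false_iff_not]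
      intro hmem
      have := hkeys _ hmem
      omega
    have hitems := PySem.Dict.items_insert_of_not_contains (d := d) (k := t + c) (v := k) hfresh
    simp only [List.foldl_cons, List.map_cons, zScanSum, List.zip_cons_cons]
    rw [ih (t + c) (d.insert (t + c) k) (fun kv hkv => hpos kv (List.mem_cons_of_mem _ hkv)) ?_]
    · rw [hitems]
      simp [List.append_assoc]
    · intro key hkey
      have : key ∈ (d.insert (t + c) k).items.map Prod.fst := hkey
      rw [hitems] at this
      simp only [List.map_append, List.mem_append, List.map_cons, List.map_nil,
        List.mem_singleton] at this
      rcases this with hk | hk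
      · have := hkeys key hk
        omega
      · omega

def zNzd : Int → List (Int × List (String × Int × Int)) → List Int
  | _, [] => []
  | c, (d, e) :: rest =>
    if zIsOn e && !(c + d == 0) then (c + d) :: zNzd 0 rest else zNzd (c + d) rest

def zOnsF : Int → List (Int × List (String × Int × Int)) → List Int
  | _, [] => []
  | t, (d, e) :: rest => if zIsOn e then (t + d) :: zOnsF (t + d) rest else zOnsF (t + d) rest

def zDfl : Int → List Int → List Int
  | _, [] => []
  | p, x :: xs => if !(x == p) then (x - p) :: zDfl x xs else zDfl x xs

theorem zocA_wait (evs : List (Int × List (String × Int × Int))) :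
    ∀ (c : Int) (dct : PySem.Dict Int Int),
    (evs.foldl (fun (s : Int × PySem.Dict Int Int) ev =>
      let c := s.1 + ev.1
      if (ev.2.headD ("", 0, 0)).1 == "on" && !(c == 0) then
        (0, if s.2.contains c then s.2.insert c (s.2.getD c 0 + 1) else s.2.insert c 1)
      else (c, s.2)) (c, dct)).2
    = (zNzd c evs).foldl (fun d w => d.insert w (d.getD w 0 + 1)) dct := by
  induction evs with
  | nil => intro c dct; rfl
  | cons ev rest ih =>
    rcases ev with ⟨d, e⟩
    intro c dct
    simp only [List.foldl_cons, zNzd]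
    by_cases hc : ((e.headD ("", 0, 0)).1 == "on" && !(c + d == 0)) = true
    · rw [show (zIsOn e && !(c + d == 0)) = true from hc, if_pos rfl, if_pos hc,
        zoc_count_step]
      simp only [List.foldl_cons]
      exact ih 0 _
    · have hz : (zIsOn e && !(c + d == 0)) = false := Bool.eq_false_iff.mpr hc
      rw [hz, if_neg hc]
      simp only [Bool.false_eq_true, if_false]
      exact ih (c + d) dct

theorem zocB_ons (evs : List (Int × List (String × Int × Int))) :
    ∀ (acc : List Int) (t : Int),
    (evs.foldl (fun (s : List Int × Int) ev =>
      let t := s.2 + ev.1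
      ((if (ev.2.headD ("", 0, 0)).1 == "on" then s.1 ++ [t] else s.1), t)) (acc, t)).1
    = acc ++ zOnsF t evs := by
  induction evs with
  | nil => intro acc t; simp [zOnsF]
  | cons ev rest ih =>
    rcases ev with ⟨d, e⟩
    intro acc t
    simp only [List.foldl_cons, zOnsF]
    by_cases h : ((e.headD ("", 0, 0)).1 == "on") = true
    · rw [show zIsOn e = true from h, if_pos rfl, if_pos h, ih]
      simp
    · have hz : zIsOn e = false := Bool.eq_false_iff.mpr h
      rw [hz, if_neg h]
      simp only [Bool.false_eq_true, if_false]
      exact ih acc (t + d)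

theorem zoc_zipdiff : ∀ (ons : List Int) (p : Int),
    ((((p :: ons).zip ons).filter (fun q => !(q.2 == q.1))).map (fun q => q.2 - q.1))
      = zDfl p ons := by
  intro ons
  induction ons with
  | nil => intro p; simp [zDfl]
  | cons x xs ih =>
    intro p
    simp only [List.zip_cons_cons, List.filter_cons, zDfl]
    cases h : (x == p) with
    | true =>
      rw [if_neg (by simp [h]), if_neg (by simp [h])]
      exact ih x
    | false =>
      rw [if_pos (by simp [h]), if_pos (by simp [h])]
      simp only [List.map_cons]
      rw [ih]

theorem zoc_dfl_onsF (evs : List (Int × List (String × Int × Int))) :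
    ∀ (t p : Int), zDfl p (zOnsF t evs) = zNzd (t - p) evs := by
  induction evs with
  | nil => intro t p; simp [zOnsF, zNzd, zDfl]
  | cons ev rest ih =>
    rcases ev with ⟨d, e⟩
    intro t p
    simp only [zOnsF, zNzd]
    have harith : t - p + d = t + d - p := by ring
    have hihz : zDfl (t + d) (zOnsF (t + d) rest) = zNzd 0 rest := by
      have := ih (t + d) (t + d)
      rwa [show t + d - (t + d) = (0 : Int) from by ring] at this
    by_cases h : zIsOn e = true
    · rw [if_pos h]
      simp only [zDfl]
      by_cases hx : t + d = p
      · have h1 : (t + d == p) = true := by simp [hx]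
        rw [if_neg (by simp [h1])]
        rw [show (zIsOn e && !(t - p + d == 0)) = false from by
          have h0 : t - p + d = 0 := by omega
          simp [h0]]
        simp only [Bool.false_eq_true, if_false, harith]
        rw [hihz]
        congr 1
        omega
      · have h1 : (t + d == p) = false := beq_false_of_ne hx
        have h2 : (t - p + d == 0) = false := beq_false_of_ne (by omega)
        rw [if_pos (by simp [h1])]
        rw [show (zIsOn e && !(t - p + d == 0)) = true from by simp [h, h2]]
        rw [hihz]
        congr 1
        omega
    · have hz : zIsOn e = false := Bool.eq_false_iff.mpr h
      rw [if_neg h, show (zIsOn e && !(t - p + d == 0)) = false from by simp [hz]]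
      simp only [Bool.false_eq_true, if_false]
      rw [ih, harith]

-- A's counter dict, walked into the cumulative dict, is B's zip(scan of counts, dedup keys)
theorem zoc_counter_cum {κ : Type} [BEq κ] [LawfulBEq κ] (l : List κ) :
    (List.foldl
      (fun (s : Int × PySem.Dict Int κ) kv => (s.1 + kv.2, s.2.insert (s.1 + kv.2) kv.1))
      (0, PySem.Dict.empty)
      (List.foldl (fun occ el =>
          if occ.contains el then occ.insert el (occ.getD el 0 + 1) else occ.insert el 1)
        (PySem.Dict.empty : PySem.Dict κ Int) l).items).2.items
    = (zScanSum 0 ((PySem.List.dedup l).map (fun k => (l.count k : Int)))).zip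
        (PySem.List.dedup l) := by
  have hins : l.foldl (fun occ el =>
        if occ.contains el then occ.insert el (occ.getD el 0 + 1) else occ.insert el 1)
        (PySem.Dict.empty : PySem.Dict κ Int)
      = l.foldl (fun occ el => occ.insert el (occ.getD el 0 + 1)) PySem.Dict.empty := by
    apply PySem.List.foldl_congr_mem
    intro acc x _
    exact zoc_count_step acc x
  rw [hins, PySem.Dict.foldl_insert_getD_add_one_eq_counter, PySem.Dict.items_counter]
  rw [zoc_cumdict _ 0 PySem.Dict.empty ?_ ?_]
  · simp [List.map_map, Function.comp_def, PySem.List.dedup_eq_ofList,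
      show (PySem.Dict.empty : PySem.Dict Int κ).items = [] from rfl]
  · intro kv hkv
    obtain ⟨k, hk, rfl⟩ := List.mem_map.mp hkv
    have hkl : k ∈ l := (PySem.Set.mem_ofList l k).mp hk
    have : 0 < l.count k := List.count_pos_iff.mpr hkl
    simp only
    omega
  · intro k hk
    simp [PySem.Dict.keys_empty] at hk

theorem zoc_main (events : List (Int × (List (String × Int × Int))))
    (hpre : Pre_zeroOrderComposition events) :
    zeroOrderComposition events = zeroOrderComposition_alt events := by
  have hpre' : ∀ p ∈ events, p.2 ≠ [] := hpre
  have hA : zocAOuter events [] = (zSpec events 0).flatMap (fun p => p.2) := by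
    rw [zocAOuter_eq events [] 0 hpre']
    simp
  have hperm := zocB_run_perm events [] [] 0 hpre' (by intro g hg; cases hg)
  have hpairs : PySem.List.sorted
      ((events.foldl zocBStep ([], [], 0)).2.1 ++
        (events.foldl zocBStep ([], [], 0)).1.map (fun g => (g.seq, g.bucket))) (fun p => p.1)
      = zSpec events 0 := by
    refine PySem.List.sorted_eq_of_perm_of_pairwise_lt _ _ _ ?_ (zSpec_bounds events 0).1
    have h1 : (zPairs (events.foldl zocBStep ([], [], 0))).Perm (zSpec events 0) := by
      simpa using hperm
    exact h1.symm
  have hkeys : ∀ p : Int × List (Int × Int),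
      p.2.foldl (fun l (i : Int × Int) => l ++ [i.1, i.2]) [p.1] = zKey p := by
    intro p
    rw [PySem.List.foldl_append_eq_flatMap]
    simp [zKey]
  have hzz : (0 : Int) - 0 = 0 := by ring
  simp only [zeroOrderComposition, zeroOrderComposition_alt]
  rw [hA, hpairs, PySem.List.foldl_append_singleton_eq_map, List.nil_append]
  simp only [hkeys]
  rw [zoc_counter_cum]
  rw [zocA_wait events 0 PySem.Dict.empty, zocB_ons events [] 0, List.nil_append,
    zoc_zipdiff (zOnsF 0 events) 0, zoc_dfl_onsF events 0 0, hzz]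
  rw [PySem.Dict.foldl_insert_getD_add_one_eq_counter, PySem.Dict.items_counter]
  rw [zoc_cumdict _ 0 PySem.Dict.empty ?_ ?_]
  · simp [zKey, List.map_map, Function.comp_def, PySem.List.dedup_eq_ofList,
      show (PySem.Dict.empty : PySem.Dict Int Int).items = [] from rfl]
  · intro kv hkv
    obtain ⟨k, hk, rfl⟩ := List.mem_map.mp hkv
    have hkl : k ∈ zNzd 0 events := (PySem.Set.mem_ofList _ k).mp hk
    have : 0 < (zNzd 0 events).count k := List.count_pos_iff.mpr hkl
    simp only
    omega
  · intro k hk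
    simp [PySem.Dict.keys_empty] at hk

-- ===== VERDICT (by name: the statement is the Claim_ definition above) =====
theorem zeroOrderComposition_spec : Claim_equal_zeroOrderComposition := by
  intro events _ hpre
  show _ = _
  exact zoc_main events hpre
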